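-- pv_equiv track=rewrite | github.com/Gyaha/AOC2015 | day21.py | read_boss
-- ===== SOURCE A (Python) =====
-- def read_boss(s: str):
--     hp, dmg, arm = 0, 0, 0
--     for l in s.splitlines():
--         ll = l.split()
--         if "Hit" == ll[0]:
--             hp = int(ll[2])
--         elif "Damage:" == ll[0]:
--             dmg = int(ll[1])
--         elif "Armor:" == ll[0]:
--             arm = int(ll[1])
--     return hp, dmg, arm
-- ===== SOURCE B (Python) =====
-- def read_boss(s: str):
--     d = {toks[0]: toks for toks in map(str.split, s.splitlines())}
--     hp = int(d["Hit"][2]) if "Hit" in d else 0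
--     dmg = int(d["Damage:"][1]) if "Damage:" in d else 0
--     arm = int(d["Armor:"][1]) if "Armor:" in d else 0
--     return hp, dmg, arm
-- ===== Notes on version B (the rewrite author's own statement) =====
-- stated objective: simpler
-- what changed: Replaces the per-line branch-dispatch loop that threads three accumulators with a one-shot dict comprehension (first token -> token list, last wins) followed by three independent field lookups with default 0.
import Mathlib
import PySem

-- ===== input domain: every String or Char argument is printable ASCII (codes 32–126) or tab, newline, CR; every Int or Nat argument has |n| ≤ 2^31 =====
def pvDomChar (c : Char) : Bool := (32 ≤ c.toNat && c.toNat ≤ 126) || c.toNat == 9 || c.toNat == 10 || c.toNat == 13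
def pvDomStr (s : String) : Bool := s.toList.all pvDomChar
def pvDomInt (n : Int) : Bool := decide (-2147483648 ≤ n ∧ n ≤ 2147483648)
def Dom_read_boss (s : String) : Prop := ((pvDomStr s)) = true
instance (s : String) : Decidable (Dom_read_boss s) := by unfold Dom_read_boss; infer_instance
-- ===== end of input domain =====

-- B replaces A's branch-dispatch accumulator loop by a dict comprehension plus three
-- independent field lookups (objective: simpler).

-- ===== PORT A =====
-- one iteration of A's for-loop; where Python would raise, Pre_ excludes the input
-- (the `none` fallthroughs are never reached inside Pre_)
def pvStepA (st : Int × Int × Int) (l : String) : Int × Int × Int :=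
  let ll := PySem.Str.split₀ l
  match PySem.List.pyGet? ll 0 with
  | none => st
  | some t0 =>
    if t0 = "Hit" then
      match (PySem.List.pyGet? ll 2).bind PySem.Int.ofStr? with
      | some n => (n, st.2.1, st.2.2)
      | none => st
    else if t0 = "Damage:" then
      match (PySem.List.pyGet? ll 1).bind PySem.Int.ofStr? with
      | some n => (st.1, n, st.2.2)
      | none => st
    else if t0 = "Armor:" then
      match (PySem.List.pyGet? ll 1).bind PySem.Int.ofStr? with
      | some n => (st.1, st.2.1, n)
      | none => st
    else st

def read_boss (s : String) : Int × Int × Int :=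
  (PySem.Str.splitlines s).foldl pvStepA (0, 0, 0)

-- ===== PORT B =====
-- one line of the dict comprehension: toks[0] ↦ toks (last wins, as Python dict insert)
def pvStepB (d : PySem.Dict String (List String)) (l : String) :
    PySem.Dict String (List String) :=
  let toks := PySem.Str.split₀ l
  match PySem.List.pyGet? toks 0 with
  | none => d          -- Python raises IndexError here; outside Pre_
  | some k => d.insert k toks

-- int(d[k][i]) if k in d else 0 (the inner `none`/getD fallbacks are never reached inside Pre_)
def pvField (d : PySem.Dict String (List String)) (k : String) (i : Int) : Int :=
  match d.get? k with
  | none => 0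
  | some toks =>
    match PySem.List.pyGet? toks i with
    | none => 0
    | some w => (PySem.Int.ofStr? w).getD 0

def read_boss_alt (s : String) : Int × Int × Int :=
  let d := (PySem.Str.splitlines s).foldl pvStepB PySem.Dict.empty
  (pvField d "Hit" 2, pvField d "Damage:" 1, pvField d "Armor:" 1)

-- ===== PRECONDITION & SPEC =====
-- Pre_ excludes exactly the inputs on which Python A raises: a line whose split() is
-- empty (IndexError on ll[0]), a recognised label line missing its value token
-- (IndexError), or whose value token is not an int literal (ValueError).
def pvLineOK (l : String) : Bool :=
  let ll := PySem.Str.split₀ l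
  decide (ll ≠ []) &&
  (ll.head? != some "Hit" || ((PySem.List.pyGet? ll 2).bind PySem.Int.ofStr?).isSome) &&
  (ll.head? != some "Damage:" || ((PySem.List.pyGet? ll 1).bind PySem.Int.ofStr?).isSome) &&
  (ll.head? != some "Armor:" || ((PySem.List.pyGet? ll 1).bind PySem.Int.ofStr?).isSome)

def Pre_read_boss (s : String) : Prop :=
  ∀ l ∈ PySem.Str.splitlines s, pvLineOK l = true

instance (s : String) : Decidable (Pre_read_boss s) := by unfold Pre_read_boss; infer_instance

def pvWitness_read_boss : String := "Hit Points: 100\nDamage: 8\nArmor: 2"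

def Spec_read_boss (s : String) (out : Int × Int × Int) : Prop := out = read_boss_alt s
instance (s : String) (out : Int × Int × Int) : Decidable (Spec_read_boss s out) := by
  unfold Spec_read_boss; infer_instance

-- ===== CLAIM (what is proved, stated in full; the proofs are below) =====
def Claim_equal_read_boss : Prop :=
  ∀ (s : String), Dom_read_boss s → Pre_read_boss s → Spec_read_boss s (read_boss s)

-- ===== LEMMAS AND PROOFS =====

-- the loop invariant: A's running triple is exactly the three field extractions from B's dict
theorem pv_invariant (ls : List String) (d : PySem.Dict String (List String))
    (h : ∀ l ∈ ls, pvLineOK l = true) :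
    ls.foldl pvStepA (pvField d "Hit" 2, pvField d "Damage:" 1, pvField d "Armor:" 1) =
      (pvField (ls.foldl pvStepB d) "Hit" 2,
       pvField (ls.foldl pvStepB d) "Damage:" 1,
       pvField (ls.foldl pvStepB d) "Armor:" 1) := by
  induction ls generalizing d with
  | nil => rfl
  | cons l ls ih =>
    have hl : pvLineOK l = true := h l (List.mem_cons_self ..)
    have hrest : ∀ x ∈ ls, pvLineOK x = true := fun x hx => h x (List.mem_cons_of_mem _ hx)
    simp only [List.foldl_cons]
    have hstep : pvStepA (pvField d "Hit" 2, pvField d "Damage:" 1, pvField d "Armor:" 1) l =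
        (pvField (pvStepB d l) "Hit" 2, pvField (pvStepB d l) "Damage:" 1,
         pvField (pvStepB d l) "Armor:" 1) := by
      unfold pvLineOK at hl
      unfold pvStepA pvStepB
      cases hll : PySem.Str.split₀ l with
      | nil => simp [hll] at hl
      | cons t0 rest =>
        simp only [hll, PySem.List.pyGet?_zero_cons, List.head?_cons, Bool.and_eq_true,
          Bool.or_eq_true, bne_iff_ne, ne_eq, Option.some.injEq, decide_eq_true_eq] at hl ⊢
        obtain ⟨⟨⟨-, hH⟩, hD⟩, hA⟩ := hl
        by_cases h0 : t0 = "Hit"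
        · subst h0
          obtain ⟨n, hn⟩ := Option.isSome_iff_exists.mp (hH.resolve_left (by simp))
          cases hb : PySem.List.pyGet? ("Hit" :: rest) 2 with
          | none => rw [hb] at hn; simp at hn
          | some w =>
            rw [hb] at hn; simp only [Option.bind_some] at hn
            simp [pvField, PySem.Dict.get?_insert, hb, hn]
        · by_cases h1 : t0 = "Damage:"
          · subst h1
            obtain ⟨n, hn⟩ := Option.isSome_iff_exists.mp (hD.resolve_left (by simp))
            cases hb : PySem.List.pyGet? ("Damage:" :: rest) 1 with
            | none => rw [hb] at hn; simp at hn
            | some w =>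
              rw [hb] at hn; simp only [Option.bind_some] at hn
              simp [pvField, PySem.Dict.get?_insert, hb, hn]
          · by_cases h2 : t0 = "Armor:"
            · subst h2
              obtain ⟨n, hn⟩ := Option.isSome_iff_exists.mp (hA.resolve_left (by simp))
              cases hb : PySem.List.pyGet? ("Armor:" :: rest) 1 with
              | none => rw [hb] at hn; simp at hn
              | some w =>
                rw [hb] at hn; simp only [Option.bind_some] at hn
                simp [pvField, PySem.Dict.get?_insert, hb, hn, h0, h1]
            · have h0' : ¬("Hit" = t0) := fun hh => h0 hh.symm
              have h1' : ¬("Damage:" = t0) := fun hh => h1 hh.symm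
              have h2' : ¬("Armor:" = t0) := fun hh => h2 hh.symm
              simp [h0, h1, h2, h0', h1', h2', pvField, PySem.Dict.get?_insert]
    rw [hstep]
    exact ih (pvStepB d l) hrest

-- ===== VERDICT (by name: the statement is the Claim_ definition above) =====
theorem read_boss_spec : Claim_equal_read_boss := by
  intro s _ hpre
  unfold Spec_read_boss read_boss read_boss_alt
  have h0 : ((0 : Int), (0 : Int), (0 : Int)) =
      (pvField PySem.Dict.empty "Hit" 2, pvField PySem.Dict.empty "Damage:" 1,
       pvField PySem.Dict.empty "Armor:" 1) := rfl
  rw [h0]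
  exact pv_invariant (PySem.Str.splitlines s) PySem.Dict.empty hpre
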